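-- pv_equiv track=rewrite | github.com/axel92xd/ayed1-2025-tps | TP3/EJ1.py | columnas_palindromas
-- ===== SOURCE A (Python) =====
-- def columnas_palindromas(matriz: list[list[int]]) -> list[int]:
--     """
--     Devuelve una lista con los números de las columnas que son palíndromas.
--     Pre: `matriz` es una matriz cuadrada.
--     Post: Devuelve una lista de enteros con los índices de las columnas palíndromas.
--     """
--     n = len(matriz)
--     palindromas = []
--     for col_idx in range(n):
--         columna = [fila[col_idx] for fila in matriz]
--         if columna == columna[::-1]:
--             palindromas.append(col_idx)
--     return palindromas
-- ===== SOURCE B (Python) =====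
-- def columnas_palindromas(matriz: list[list[int]]) -> list[int]:
--     """
--     Devuelve una lista con los numeros de las columnas que son palindromas.
--     Two-pointer check per column: compare top and bottom halves in place,
--     breaking early, instead of materialising each column and a reversed copy.
--     """
--     n = len(matriz)
--     palindromas = []
--     for col in range(n):
--         ok = True
--         for i in range(n // 2):
--             if matriz[i][col] != matriz[n - 1 - i][col]:
--                 ok = False
--                 break
--         if ok:
--             palindromas.append(col)
--     return palindromas
-- ===== Notes on version B (the rewrite author's own statement) =====
-- stated objective: idiomatic
-- what changed: Instead of building each column as a list plus a reversed copy and comparing them, B runs an in-place two-pointer check per column, comparing row i with row n-1-i for i < n//2 and breaking on the first mismatch.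
import Mathlib
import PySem

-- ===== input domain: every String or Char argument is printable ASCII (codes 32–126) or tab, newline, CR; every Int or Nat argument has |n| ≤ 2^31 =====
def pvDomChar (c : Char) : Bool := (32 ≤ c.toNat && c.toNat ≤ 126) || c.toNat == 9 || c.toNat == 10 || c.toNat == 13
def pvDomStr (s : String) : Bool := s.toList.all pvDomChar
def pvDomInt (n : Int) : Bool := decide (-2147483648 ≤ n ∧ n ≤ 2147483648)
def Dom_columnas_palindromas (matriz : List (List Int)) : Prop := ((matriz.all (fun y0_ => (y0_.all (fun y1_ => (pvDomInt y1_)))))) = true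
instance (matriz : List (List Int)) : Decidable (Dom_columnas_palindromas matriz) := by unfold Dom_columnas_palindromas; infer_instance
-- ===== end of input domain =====

-- B replaces A's column-list + reversed-copy comparison by an in-place two-pointer
-- half-scan of each column with early exit (idiomatic alternative, same asymptotics).

-- ===== PORT A =====
-- columna[::-1] is exactly List.reverse (PySem.List.slice?_none_none_neg_one).
def columnas_palindromas (matriz : List (List Int)) : List Int :=
  let n : Int := matriz.length
  (PySem.List.pyRange 0 n 1).foldl
    (fun palindromas col_idx =>
      let columna := matriz.map (fun fila => PySem.List.pyGet? fila col_idx)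
      if columna = columna.reverse then palindromas ++ [col_idx] else palindromas)
    []

-- ===== PORT B =====
-- matriz[i][col]; none where Python raises IndexError (excluded by Pre_).
def pvGet2 (matriz : List (List Int)) (i col : Int) : Option Int :=
  match PySem.List.pyGet? matriz i with
  | some fila => PySem.List.pyGet? fila col
  | none => none

-- the inner 'for i in range(n//2): … break' loop of B
def pvCheckCol (matriz : List (List Int)) (n col : Int) : List Int → Bool
  | [] => true
  | i :: rest =>
    if pvGet2 matriz i col ≠ pvGet2 matriz (n - 1 - i) col then false
    else pvCheckCol matriz n col rest

def columnas_palindromas_alt (matriz : List (List Int)) : List Int :=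
  let n : Int := matriz.length
  (PySem.List.pyRange 0 n 1).foldl
    (fun palindromas col =>
      if pvCheckCol matriz n col (PySem.List.pyRange 0 (PySem.Int.floordiv n 2) 1)
      then palindromas ++ [col] else palindromas)
    []

-- ===== PRECONDITION & SPEC =====
-- Pre_ excludes exactly the inputs on which Python A raises IndexError:
-- some row shorter than the number of rows (A indexes fila[col] for every col < len(matriz)).
def Pre_columnas_palindromas (matriz : List (List Int)) : Prop :=
  ∀ fila ∈ matriz, matriz.length ≤ fila.length
instance (matriz : List (List Int)) : Decidable (Pre_columnas_palindromas matriz) := by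
  unfold Pre_columnas_palindromas; infer_instance

def pvWitness_columnas_palindromas : List (List Int) := [[1, 2], [1, 3]]

def Spec_columnas_palindromas (matriz : List (List Int)) (out : List Int) : Prop :=
  out = columnas_palindromas_alt matriz
instance (matriz : List (List Int)) (out : List Int) : Decidable (Spec_columnas_palindromas matriz out) := by
  unfold Spec_columnas_palindromas; infer_instance

-- ===== CLAIM (what is proved, stated in full; the proofs are below) =====
def Claim_equal_columnas_palindromas : Prop :=
  ∀ (matriz : List (List Int)), Dom_columnas_palindromas matriz →
    Pre_columnas_palindromas matriz →
    Spec_columnas_palindromas matriz (columnas_palindromas matriz)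

-- ===== LEMMAS AND PROOFS =====

-- the break-loop returns true iff every visited pair matches
theorem pvCheckCol_eq_true_iff (matriz : List (List Int)) (n col : Int) (L : List Int) :
    pvCheckCol matriz n col L = true ↔
      ∀ i ∈ L, pvGet2 matriz i col = pvGet2 matriz (n - 1 - i) col := by
  induction L with
  | nil => simp [pvCheckCol]
  | cons a rest ih =>
    simp only [pvCheckCol]
    split_ifs with h
    · simp only [false_iff]
      intro hall
      exact h (hall a (by simp))
    · push_neg at h
      simp [ih, h]

-- half-range characterisation of l = l.reverse via getElem?
theorem pal_half_iff (l : List (Option Int)) :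
    l = l.reverse ↔ ∀ i : Nat, i < l.length / 2 → l[i]? = l[l.length - 1 - i]? := by
  constructor
  · intro h i hi
    conv_lhs => rw [h]
    exact List.getElem?_reverse (by omega)
  · intro h
    apply List.ext_getElem?
    intro i
    by_cases hi : i < l.length
    · rw [List.getElem?_reverse hi]
      by_cases h1 : i < l.length / 2
      · exact h i h1
      · by_cases h2 : l.length - 1 - i < l.length / 2
        · have := h (l.length - 1 - i) h2
          rw [this]
          congr 1
          omega
        · -- middle element (or equal indices): i = l.length - 1 - i
          congr 1
          omega
    · rw [List.getElem?_eq_none (by omega), List.getElem?_eq_none (by simp; omega)]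

-- bridge: B's nested indexing equals indexing A's column list
theorem get2_eq (matriz : List (List Int)) (col : Int) (j : Nat) (hj : j < matriz.length) :
    some (pvGet2 matriz (j : Int) col)
      = (matriz.map (fun fila => PySem.List.pyGet? fila col))[j]? := by
  simp [pvGet2, PySem.List.pyGet?_natCast, List.getElem?_eq_getElem hj]

-- the two per-column conditions agree (for every col, any matrix)
theorem cond_iff (matriz : List (List Int)) (col : Int) :
    (matriz.map (fun fila => PySem.List.pyGet? fila col)
      = (matriz.map (fun fila => PySem.List.pyGet? fila col)).reverse) ↔
    pvCheckCol matriz (matriz.length : Int) col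
      (PySem.List.pyRange 0 (PySem.Int.floordiv (matriz.length : Int) 2) 1) = true := by
  set c := matriz.map (fun fila => PySem.List.pyGet? fila col) with hc
  have hlen : c.length = matriz.length := by simp [hc]
  have hdiv : PySem.Int.floordiv (matriz.length : Int) 2 = ((matriz.length / 2 : Nat) : Int) :=
    PySem.Int.floordiv_natCast matriz.length 2
  rw [pal_half_iff, pvCheckCol_eq_true_iff]
  simp only [hlen]
  constructor
  · intro h i hi
    rw [PySem.List.mem_pyRange_one, hdiv] at hi
    obtain ⟨j, rfl⟩ : ∃ j : Nat, i = (j : Int) := ⟨i.toNat, by omega⟩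
    have hj2 : j < matriz.length / 2 := by omega
    have hmi : ((matriz.length : Int) - 1 - (j : Int)) = ((matriz.length - 1 - j : Nat) : Int) := by
      omega
    apply Option.some.inj
    rw [get2_eq matriz col j (by omega), hmi, get2_eq matriz col _ (by omega)]
    exact h j hj2
  · intro h j hj
    have hmem : ((j : Int)) ∈ PySem.List.pyRange 0 (PySem.Int.floordiv (matriz.length : Int) 2) 1 := by
      rw [PySem.List.mem_pyRange_one, hdiv]; omega
    have hpair := h (j : Int) hmem
    have hmi : ((matriz.length : Int) - 1 - (j : Int)) = ((matriz.length - 1 - j : Nat) : Int) := by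
      omega
    rw [hmi] at hpair
    rw [← get2_eq matriz col j (by omega), ← get2_eq matriz col (matriz.length - 1 - j) (by omega),
        hpair]

-- ===== VERDICT (by name: the statement is the Claim_ definition above) =====
theorem columnas_palindromas_spec : Claim_equal_columnas_palindromas := by
  intro matriz _ _
  show columnas_palindromas matriz = columnas_palindromas_alt matriz
  simp only [columnas_palindromas, columnas_palindromas_alt]
  apply PySem.List.foldl_congr_mem
  intro acc col _
  by_cases h : (matriz.map (fun fila => PySem.List.pyGet? fila col)
      = (matriz.map (fun fila => PySem.List.pyGet? fila col)).reverse)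
  · simp only [if_pos h, if_pos ((cond_iff matriz col).mp h)]
  · simp only [if_neg h, if_neg (fun hb => h ((cond_iff matriz col).mpr hb))]
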